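-- pv_equiv track=rewrite | github.com/pr1ncelpb/Pyc-to-Py-New-Gen | postprocess/post_processor.py | _fix_empty_bodies
-- ===== SOURCE A (Python) =====
-- from typing import Optional, List, Dict, Tuple, Any, Set
--
-- def _fix_empty_bodies(lines: List[str]) -> List[str]:
--
--     out = []
--     i = 0
--     while i < len(lines):
--         line = lines[i]
--         out.append(line)
--         stripped = line.rstrip()
--         if stripped.endswith(':') and not stripped.strip().startswith('#'):
--             current_indent = len(line) - len(line.lstrip())
--
--             j = i + 1
--             while j < len(lines) and not lines[j].strip():
--                 j += 1
--             if j < len(lines):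
--                 next_line = lines[j]
--                 next_indent = len(next_line) - len(next_line.lstrip())
--                 next_stripped = next_line.strip()
--
--                 if next_indent <= current_indent and next_stripped:
--                     out.append(' ' * (current_indent + 4) + 'pass')
--
--                 elif next_indent > current_indent:
--
--                     all_comments = True
--                     k = j
--                     while k < len(lines):
--                         kl = lines[k]
--                         if not kl.strip():
--                             k += 1
--                             continue
--                         k_indent = len(kl) - len(kl.lstrip())
--                         if k_indent <= current_indent:
--                             break
--                         if not kl.strip().startswith('#'):
--                             all_comments = False
--                             break
--                         k += 1
--                     if all_comments:
--
--                         out.append(' ' * (current_indent + 4) + 'pass')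
--             else:
--                 out.append(' ' * (current_indent + 4) + 'pass')
--         i += 1
--     return out
-- ===== SOURCE B (Python) =====
-- from typing import List
--
-- def _fix_empty_bodies(lines: List[str]) -> List[str]:
--     # One backward pass. State m = for the suffix already processed: the minimum
--     # indent of the non-blank lines from the start of the suffix up to (and including)
--     # the first non-blank non-comment line, or None if the suffix has no such line.
--     # A colon header needs a 'pass' exactly when m is None or m <= its indent.
--     out = []
--     m = None
--     for line in reversed(lines):
--         s = line.strip()
--         indent = len(line) - len(line.lstrip())
--         if line.rstrip().endswith(':') and not s.startswith('#') and (m is None or m <= indent):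
--             out.append(' ' * (indent + 4) + 'pass')
--         out.append(line)
--         if s:
--             if not s.startswith('#'):
--                 m = indent
--             elif m is not None:
--                 m = min(m, indent)
--     out.reverse()
--     return out
-- ===== Notes on version B (the rewrite author's own statement) =====
-- stated objective: alternative
-- what changed: A rescans forward from every colon header (a skip-blanks scan plus an all-comments scan per header, quadratic in the worst case); B makes one backward pass over the lines, carrying a single Option[int] state (the minimum indent of the non-blank lines up to the first non-comment line of the suffix) that decides each header's need for 'pass' in O(1).
import Mathlib
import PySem

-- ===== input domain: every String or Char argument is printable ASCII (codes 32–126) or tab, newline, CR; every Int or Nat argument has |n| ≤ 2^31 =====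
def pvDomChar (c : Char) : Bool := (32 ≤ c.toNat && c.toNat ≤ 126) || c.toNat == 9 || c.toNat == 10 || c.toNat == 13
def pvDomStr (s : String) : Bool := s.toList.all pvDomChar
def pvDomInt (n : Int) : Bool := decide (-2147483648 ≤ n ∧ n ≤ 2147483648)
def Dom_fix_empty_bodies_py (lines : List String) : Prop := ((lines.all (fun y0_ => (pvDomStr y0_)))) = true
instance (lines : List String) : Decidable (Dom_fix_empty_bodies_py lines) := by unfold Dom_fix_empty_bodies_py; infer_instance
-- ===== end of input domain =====

-- Alternative algorithm: A rescans forward from every colon header; B is one backward pass carrying a single Option Int state; return value proved equal.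

-- shared helpers: both Pythons compute len(line)-len(line.lstrip()) and ' '*(cur+4)+'pass'
def pvIndent (l : String) : Int := PySem.Str.len l - PySem.Str.len (PySem.Str.lstrip l)
def pvPass (cur : Int) : String := String.ofList (List.replicate (cur + 4).toNat ' ' ++ ['p','a','s','s'])
def pvBlank (l : String) : Bool := PySem.Str.strip l == ""

-- ===== PORT A =====
-- inner `while j` loop: skip blank lines
def skipBlanksA : List String → List String
  | [] => []
  | l :: rest => if pvBlank l then skipBlanksA rest else l :: rest

-- inner `while k` loop
def allCommentsA (cur : Int) : List String → Bool
  | [] => true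
  | kl :: rest =>
      if pvBlank kl then allCommentsA cur rest
      else if pvIndent kl ≤ cur then true
      else if !PySem.Str.startswith (PySem.Str.strip kl) "#" then false
      else allCommentsA cur rest

-- the body of A's `if stripped.endswith(':') …` block: what gets appended after `line`
def extraA (cur : Int) (rest : List String) : List String :=
  match skipBlanksA rest with
  | [] => [pvPass cur]
  | next :: r =>
      let ni := pvIndent next
      let ns := PySem.Str.strip next
      if ni ≤ cur && ns != "" then [pvPass cur]
      else if cur < ni then (if allCommentsA cur (next :: r) then [pvPass cur] else [])
      else []

-- outer `while i` loop of A
def fix_empty_bodies_py : List String → List String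
  | [] => []
  | line :: rest =>
      let stripped := PySem.Str.rstrip line
      if PySem.Str.endswith stripped ":" && !PySem.Str.startswith (PySem.Str.strip stripped) "#" then
        line :: (extraA (pvIndent line) rest ++ fix_empty_bodies_py rest)
      else
        line :: fix_empty_bodies_py rest

-- ===== PORT B =====
-- B's single backward loop (`for line in reversed(lines)` with state m, then reverse):
-- rendered as structural recursion that processes the tail first — the same traversal
-- order and the same state m ("min indent up to the first real (non-comment) line, none if no such line").
def goB : List String → Option Int × List String
  | [] => (none, [])
  | line :: rest =>
      let mo := goB rest
      let m := mo.1
      let s := PySem.Str.strip line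
      let ind := pvIndent line
      let out' :=
        if PySem.Str.endswith (PySem.Str.rstrip line) ":" && !PySem.Str.startswith s "#"
            && (match m with | none => true | some v => decide (v ≤ ind)) then
          line :: pvPass ind :: mo.2
        else line :: mo.2
      let m' :=
        if s == "" then m
        else if !PySem.Str.startswith s "#" then some ind
        else match m with | none => none | some v => some (min v ind)
      (m', out')

def fix_empty_bodies_py_alt (lines : List String) : List String := (goB lines).2

-- ===== PRECONDITION & SPEC =====
def Spec_fix_empty_bodies_py (lines : List String) (out : List String) : Prop := out = fix_empty_bodies_py_alt lines
instance (lines : List String) (out : List String) : Decidable (Spec_fix_empty_bodies_py lines out) := by unfold Spec_fix_empty_bodies_py; infer_instance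

-- ===== CLAIM (what is proved, stated in full; the proofs are below) =====
def Claim_equal_fix_empty_bodies_py : Prop := ∀ (lines : List String), Dom_fix_empty_bodies_py lines → Spec_fix_empty_bodies_py lines (fix_empty_bodies_py lines)

-- ===== LEMMAS AND PROOFS =====

theorem dw_idem (p : Char → Bool) (x : List Char) : (x.dropWhile p).dropWhile p = x.dropWhile p := by
  match h : x.dropWhile p with
  | [] => simp
  | y :: ys =>
    have hy : p y = false := by
      have := List.head_dropWhile_not (l := x) (p := p) (h ▸ List.cons_ne_nil y ys)
      simpa [h] using this
    simp [hy]

-- stripping from the left and from the right commute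
theorem lr_comm (p : Char → Bool) (s : List Char) :
    ((s.reverse.dropWhile p).reverse).dropWhile p = ((s.dropWhile p).reverse.dropWhile p).reverse := by
  induction s with
  | nil => simp
  | cons c t ih =>
    by_cases ht : t.reverse.dropWhile p = []
    · have htt : t.dropWhile p = [] := List.dropWhile_eq_nil_iff.mpr
        (fun x hx => (List.dropWhile_eq_nil_iff.1 ht) x (List.mem_reverse.mpr hx))
      by_cases hc : p c = true
      · simp [List.dropWhile_append, ht, htt, hc]
      · simp [List.dropWhile_append, ht, htt, hc]
    · by_cases hc : p c = true
      · simp only [List.reverse_cons, List.dropWhile_append, List.dropWhile_cons, hc]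
        simpa [ht, hc] using ih
      · simp [List.dropWhile_append, ht, hc]

-- `stripped.strip()` in A, with stripped = line.rstrip(), equals line.strip() in B
theorem strip_rstrip (cs : List Char) :
    PySem.Chars.strip (PySem.Chars.rstrip cs) = PySem.Chars.strip cs := by
  simp [PySem.Chars.strip, PySem.Chars.rstrip, PySem.Chars.lstrip]
  rw [lr_comm PySem.Chars.isspace cs]
  simp [dw_idem]

-- proof-only characterisation of B's state: min indent of the non-blank lines up to
-- and including the first non-comment one; none if no non-comment line exists
def nxtm : List String → Option Int
  | [] => none
  | l :: rest =>
      if pvBlank l then nxtm rest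
      else if !PySem.Str.startswith (PySem.Str.strip l) "#" then some (pvIndent l)
      else match nxtm rest with
        | none => none
        | some v => some (min v (pvIndent l))

def passCond (m : Option Int) (cur : Int) : Bool :=
  match m with | none => true | some v => decide (v ≤ cur)

theorem goB_fst (xs : List String) : (goB xs).1 = nxtm xs := by
  induction xs with
  | nil => rfl
  | cons l rest ih =>
    simp only [goB, nxtm, pvBlank, ih]
    split_ifs <;> simp_all

theorem nxtm_skipBlanksA (xs : List String) : nxtm (skipBlanksA xs) = nxtm xs := by
  induction xs with
  | nil => rfl
  | cons l rest ih =>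
    by_cases h : pvBlank l = true
    · simp [skipBlanksA, nxtm, h, ih]
    · simp [skipBlanksA, h]

theorem skipBlanksA_head (xs : List String) {next : String} {r : List String}
    (h : skipBlanksA xs = next :: r) : pvBlank next = false := by
  induction xs with
  | nil => simp [skipBlanksA] at h
  | cons l rest ih =>
    by_cases hb : pvBlank l = true
    · exact ih (by simpa [skipBlanksA, hb] using h)
    · simp [skipBlanksA, hb] at h
      simp [← h.1, hb]

theorem allCommentsA_eq (cur : Int) (xs : List String) :
    allCommentsA cur xs = passCond (nxtm xs) cur := by
  induction xs with
  | nil => rfl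
  | cons l rest ih =>
    cases hb : pvBlank l with
    | true => simp [allCommentsA, nxtm, hb, ih]
    | false =>
      cases hcm : PySem.Chars.startswith (PySem.Chars.strip l.toList) ['#'] with
      | false =>
        by_cases hind : pvIndent l ≤ cur
        · simp [allCommentsA, nxtm, hb, hcm, hind, passCond]
        · simp [allCommentsA, nxtm, hb, hcm, hind, passCond]
      | true =>
        by_cases hind : pvIndent l ≤ cur
        · simp [allCommentsA, nxtm, hb, hcm, hind, passCond]
          cases hr : nxtm rest <;> simp <;> omega
        · simp [allCommentsA, nxtm, hb, hcm, hind, passCond, ih]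
          cases hr : nxtm rest <;> simp <;> omega

theorem extraA_eq (cur : Int) (rest : List String) :
    extraA cur rest = if passCond (nxtm rest) cur then [pvPass cur] else [] := by
  have hn := nxtm_skipBlanksA rest
  cases h : skipBlanksA rest with
  | nil =>
    rw [h] at hn
    simp [extraA, h, ← hn, nxtm, passCond]
  | cons next r =>
    rw [h] at hn
    have hnb : pvBlank next = false := skipBlanksA_head rest h
    have hns : ¬ PySem.Str.strip next = "" := by
      simp only [pvBlank] at hnb
      simpa using hnb
    rw [← hn]
    by_cases hind : pvIndent next ≤ cur
    · have hpc : passCond (nxtm (next :: r)) cur = true := by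
        cases hcm : PySem.Chars.startswith (PySem.Chars.strip next.toList) ['#'] with
        | false => simp [nxtm, hnb, hcm, passCond, hind]
        | true =>
          simp [nxtm, hnb, hcm, passCond]
          cases hr : nxtm r <;> simp <;> omega
      simp [extraA, h, hind, hns, hpc]
    · have hlt : cur < pvIndent next := by omega
      simp [extraA, h, hind, hlt, allCommentsA_eq]

theorem main_eq (xs : List String) : fix_empty_bodies_py xs = (goB xs).2 := by
  induction xs with
  | nil => rfl
  | cons line rest ih =>
    have hm : (goB rest).1 = nxtm rest := goB_fst rest
    have hsr : PySem.Chars.strip (PySem.Chars.rstrip line.toList) =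
        PySem.Chars.strip line.toList := strip_rstrip line.toList
    cases hcol : PySem.Chars.endswith (PySem.Chars.rstrip line.toList) [':'] with
    | false => simp [fix_empty_bodies_py, goB, hcol, ih]
    | true =>
      cases hcm : PySem.Chars.startswith (PySem.Chars.strip line.toList) ['#'] with
      | true => simp [fix_empty_bodies_py, goB, hcol, hcm, hsr, ih]
      | false =>
        cases hpc : passCond (nxtm rest) (pvIndent line) with
        | true =>
          simp [fix_empty_bodies_py, goB, hcol, hcm, hsr, ih, hm, extraA_eq, hpc, passCond]
          cases hnx : nxtm rest with
          | none => simp [hnx]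
          | some v =>
            simp only [passCond, hnx, decide_eq_true_eq] at hpc
            simp [hnx, hpc]
        | false =>
          simp [fix_empty_bodies_py, goB, hcol, hcm, hsr, ih, hm, extraA_eq, hpc, passCond]
          cases hnx : nxtm rest with
          | none => simp [passCond, hnx] at hpc
          | some v =>
            simp only [passCond, hnx, decide_eq_false_iff_not] at hpc
            simp [hnx, hpc]

-- ===== VERDICT (by name: the statement is the Claim_ definition above) =====
theorem fix_empty_bodies_py_spec : Claim_equal_fix_empty_bodies_py := by
  intro lines _
  unfold Spec_fix_empty_bodies_py fix_empty_bodies_py_alt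
  exact main_eq lines
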